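-- pv_equiv track=rewrite | github.com/IvanNascimento/class-codes | Python/ProgramacaoEstruturada/aula-07/main.py | replace_custom
-- ===== SOURCE A (Python) =====
-- def replace_custom(entrada: str, substr: str, nova_substr: str) -> str:
--     saida = ""
--     __temp = len(substr)
--     i = 0
--     while i < len(entrada):
--         if entrada[i : i + __temp] == substr:
--             saida += nova_substr
--             if __temp != 1:
--                 i += __temp
--             else:
--                 i += 1
--         else:
--             saida += entrada[i]
--             i += 1
--     return saida
-- ===== SOURCE B (Python) =====
-- def replace_custom(entrada: str, substr: str, nova_substr: str) -> str:
--     # Idiomatic: the hand-rolled scan is exactly left-to-right non-overlapping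
--     # replacement, i.e. str.replace (for non-empty substr).
--     return entrada.replace(substr, nova_substr)
-- ===== Notes on version B (the rewrite author's own statement) =====
-- stated objective: idiomatic
-- what changed: B replaces A's hand-rolled index/slice scanning loop with a single call to Python's built-in str.replace, which performs the same left-to-right non-overlapping replacement.
-- outside the precondition, e.g. on replace_custom('', '', 'x'): A returns '', B returns 'x'; on replace_custom('ab', '', 'x'): A does not finish within the time limit, B returns 'xaxbx'
import Mathlib
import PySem

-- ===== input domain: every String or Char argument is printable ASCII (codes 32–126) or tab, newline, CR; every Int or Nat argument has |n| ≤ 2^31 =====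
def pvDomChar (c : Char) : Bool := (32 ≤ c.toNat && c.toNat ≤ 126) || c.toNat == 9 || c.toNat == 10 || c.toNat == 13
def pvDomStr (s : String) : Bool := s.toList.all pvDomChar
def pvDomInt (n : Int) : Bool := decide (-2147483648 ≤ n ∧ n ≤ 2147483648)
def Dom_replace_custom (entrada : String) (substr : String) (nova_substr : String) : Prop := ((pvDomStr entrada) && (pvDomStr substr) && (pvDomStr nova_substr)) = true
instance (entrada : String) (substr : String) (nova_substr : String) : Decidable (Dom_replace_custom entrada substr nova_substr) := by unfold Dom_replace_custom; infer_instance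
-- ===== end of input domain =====

-- B replaces A's hand-rolled index/slice scanning loop with a single call to the
-- built-in str.replace (idiomatic); return values agree whenever substr ≠ "".

-- ===== PORT A =====
-- A's while loop: fuel = entrada.length bounds the loop (inside Pre_, i advances
-- by ≥ 1 each iteration, so the fuel is never exhausted while i < len(entrada)).
def pvLoopA (s sub new : List Char) : Nat → Nat → List Char → List Char
  | 0, _, saida => saida
  | fuel+1, i, saida =>
    if i < s.length then
      -- entrada[i : i + __temp] == substr
      if PySem.List.slice s (some (i : Int)) (some ((i : Int) + (sub.length : Int))) = sub then
        if sub.length ≠ 1 then pvLoopA s sub new fuel (i + sub.length) (saida ++ new)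
        else pvLoopA s sub new fuel (i + 1) (saida ++ new)
      else
        -- saida += entrada[i]  (i < len(entrada), so pyGet? is some; .toList = [c])
        pvLoopA s sub new fuel (i + 1) (saida ++ (PySem.List.pyGet? s (i : Int)).toList)
    else saida

def replace_custom (entrada : String) (substr : String) (nova_substr : String) : String :=
  String.ofList (pvLoopA entrada.toList substr.toList nova_substr.toList entrada.toList.length 0 [])

-- ===== PORT B =====
def replace_custom_alt (entrada : String) (substr : String) (nova_substr : String) : String :=
  PySem.Str.replace entrada substr nova_substr

-- ===== PRECONDITION & SPEC =====
-- Pre_ excludes substr = "": there A loops forever on non-empty entrada, and on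
-- empty entrada returns "" where Python's replace returns nova_substr — an
-- accidental corner of A's loop, unmatchable without contorting B.
def Pre_replace_custom (entrada : String) (substr : String) (nova_substr : String) : Prop :=
  substr ≠ ""
instance (entrada : String) (substr : String) (nova_substr : String) : Decidable (Pre_replace_custom entrada substr nova_substr) := by unfold Pre_replace_custom; infer_instance

def pvWitness_replace_custom : String × String × String := ("abcabca", "bc", "XY")

def Spec_replace_custom (entrada : String) (substr : String) (nova_substr : String) (out : String) : Prop := out = replace_custom_alt entrada substr nova_substr
instance (entrada : String) (substr : String) (nova_substr : String) (out : String) : Decidable (Spec_replace_custom entrada substr nova_substr out) := by unfold Spec_replace_custom; infer_instance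

-- ===== CLAIM (what is proved, stated in full; the proofs are below) =====
def Claim_equal_replace_custom : Prop := ∀ (entrada : String) (substr : String) (nova_substr : String), Dom_replace_custom entrada substr nova_substr → Pre_replace_custom entrada substr nova_substr → Spec_replace_custom entrada substr nova_substr (replace_custom entrada substr nova_substr)

-- ===== LEMMAS AND PROOFS =====

-- The common left-to-right non-overlapping replacement, fuel-indexed.
def pvOut (sub new : List Char) : Nat → List Char → List Char
  | _, [] => []
  | 0, _ :: _ => []
  | fuel+1, c :: t =>
    if sub.isPrefixOf (c :: t) then new ++ pvOut sub new fuel (List.drop sub.length (c :: t))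
    else c :: pvOut sub new fuel t

theorem pvOut_zero (sub new l) : pvOut sub new 0 l = [] := by
  cases l <;> rfl

theorem pvGo_eq (sub new : List Char) (hsub : sub ≠ []) :
    ∀ (fuel : Nat) (l acc : List Char), l.length ≤ fuel →
      PySem.Chars.replace.go sub new fuel l acc = acc.reverse ++ pvOut sub new fuel l := by
  intro fuel
  induction fuel with
  | zero =>
    intro l acc hl
    have : l = [] := List.eq_nil_of_length_eq_zero (Nat.le_zero.mp hl)
    subst this
    simp [PySem.Chars.replace.go, pvOut]
  | succ fuel ih =>
    intro l acc hl
    cases l with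
    | nil => simp [PySem.Chars.replace.go, pvOut]
    | cons c t =>
      rw [PySem.Chars.replace.go]
      by_cases hp : sub.isPrefixOf (c :: t)
      · have hm : 1 ≤ sub.length := by
          cases sub with
          | nil => exact absurd rfl hsub
          | cons _ _ => simp
        have hlen : (List.drop sub.length (c :: t)).length ≤ fuel := by
          simp only [List.length_drop, List.length_cons] at *
          omega
        simp only [hp, if_true, pvOut, ih _ _ hlen, List.reverse_append, List.reverse_reverse,
          List.append_assoc]
      · have hlen : t.length ≤ fuel := by
          simp only [List.length_cons] at hl; omega
        simp only [hp, if_false, Bool.false_eq_true, pvOut, ih _ _ hlen, List.reverse_cons,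
          List.append_assoc, List.singleton_append]

theorem pvLoopA_eq (s sub new : List Char) :
    ∀ (fuel i : Nat) (saida : List Char),
      pvLoopA s sub new fuel i saida = saida ++ pvOut sub new fuel (s.drop i) := by
  intro fuel
  induction fuel with
  | zero => intro i saida; simp [pvLoopA, pvOut_zero]
  | succ fuel ih =>
    intro i saida
    rw [pvLoopA]
    by_cases h : i < s.length
    · have hdrop : s.drop i = s[i] :: s.drop (i + 1) := List.drop_eq_getElem_cons h
      have hslice : PySem.List.slice s (some (i : Int)) (some ((i : Int) + (sub.length : Int)))
          = (s.drop i).take sub.length := PySem.List.slice_natCast_add s i sub.length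
      by_cases hmatch : (s.drop i).take sub.length = sub
      · have hpre : sub.isPrefixOf (s.drop i) = true := by
          rw [List.isPrefixOf_iff_prefix, List.prefix_iff_eq_take, hmatch]
        have hrec : ∀ j, pvLoopA s sub new fuel j (saida ++ new)
            = saida ++ (new ++ pvOut sub new fuel (s.drop j)) := by
          intro j; rw [ih]; simp [List.append_assoc]
        rw [if_pos h, hslice, if_pos hmatch, hdrop]
        simp only [pvOut]
        rw [← hdrop]
        simp only [hpre, if_true, List.drop_drop]
        by_cases h1 : sub.length ≠ 1
        · rw [if_pos h1, hrec]
        · rw [if_neg h1, hrec]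
          rw [not_ne_iff] at h1
          rw [h1]
      · have hpre : sub.isPrefixOf (s.drop i) = false := by
          rw [Bool.eq_false_iff]
          intro hc
          rw [List.isPrefixOf_iff_prefix, List.prefix_iff_eq_take] at hc
          exact hmatch hc.symm
        have hget : PySem.List.pyGet? s (i : Int) = some s[i] := by
          simp [pysem, h]
        simp only [h, if_true, hslice, hmatch, if_false, hget, Option.toList_some, ih]
        rw [hdrop]
        simp only [pvOut, ← hdrop, hpre, Bool.false_eq_true, if_false]
        simp
    · have hdrop : s.drop i = [] := List.drop_eq_nil_of_le (Nat.le_of_not_lt h)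
      simp [h, hdrop, pvOut]

-- ===== VERDICT (by name: the statement is the Claim_ definition above) =====
theorem replace_custom_spec : Claim_equal_replace_custom := by
  intro entrada substr nova_substr _ hpre
  have hsub : substr.toList ≠ [] := by
    intro hc
    exact hpre (String.toList_eq_nil_iff.mp hc)
  unfold Spec_replace_custom replace_custom replace_custom_alt PySem.Str.replace
  rw [PySem.Chars.replace]
  have hempty : substr.toList.isEmpty = false := by
    simp [hsub]
  rw [hempty]
  simp only [Bool.false_eq_true, if_false]
  rw [pvGo_eq _ _ hsub _ _ _ (le_refl _), pvLoopA_eq _ _ _]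
  simp
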